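-- pv_equiv track=rewrite | github.com/ViacheslavBoltukhov/- | Поляков/25/2866(Муфузаилов).py | check
-- ===== SOURCE A (Python) =====
-- def divisors(n):
--     v = set()
--     for i in range(1, int(n**0.5) + 1):
--         if (n % i == 0):
--             v.add(i)
--             v.add(n // i)
--     v=sorted(v)
--     return v[:-1]
--
-- def check(n):
--     v = []
--     v = divisors(n)
--     r = len(v)
--     # Подмножество для проверки
--     subset = [[0 for i in range(n + 1)]
--               for j in range(r + 1)]
--     # 1-ый столбец "Истина"
--     for i in range(r + 1):
--         subset[i][0] = True
--
--     # 1-ая строка "Ложь", кроме 0-ой позиции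
--     for i in range(1, n + 1):
--         subset[0][i] = False
--
--     # Цикл для определения полусовершенности
--     for i in range(1, r + 1):
--         for j in range(1, n + 1):
--             # суммирование делителей числа
--             if (j < v[i - 1]):
--                 subset[i][j] = subset[i - 1][j]
--             else:
--                 subset[i][j] = (subset[i - 1][j] or
--                                 subset[i - 1][j - v[i - 1]])
--     #Проверка на полусовепшенность
--     if (subset[r][n]) == 0:
--         return False
--     else:
--         return True
-- ===== SOURCE B (Python) =====
-- def divisors(n):
--     v = set()
--     for i in range(1, int(n**0.5) + 1):
--         if (n % i == 0):
--             v.add(i)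
--             v.add(n // i)
--     v=sorted(v)
--     return v[:-1]
--
-- def merge(a, b):
--     # two-pointer merge of two increasing lists, dropping duplicates
--     out = []
--     i = j = 0
--     while i < len(a) and j < len(b):
--         if a[i] < b[j]:
--             out.append(a[i]); i += 1
--         elif b[j] < a[i]:
--             out.append(b[j]); j += 1
--         else:
--             out.append(a[i]); i += 1; j += 1
--     out.extend(a[i:])
--     out.extend(b[j:])
--     return out
--
-- def check(n):
--     sums = [0]  # increasing list of subset sums of the divisors seen so far, capped at n
--     for d in divisors(n):
--         sums = merge(sums, [s + d for s in sums if s + d <= n])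
--     return n in sums
-- ===== Notes on version B (the rewrite author's own statement) =====
-- stated objective: faster
-- what changed: Replaces the (r+1)x(n+1) boolean subset-sum DP table, whose inner loop scans every column j in 1..n for each divisor, with an increasing list of currently reachable subset sums extended by a two-pointer dedup merge per divisor and a final membership test.
-- outside the precondition, e.g. on check(-3): A raises TypeError, B raises TypeError
import Mathlib
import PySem

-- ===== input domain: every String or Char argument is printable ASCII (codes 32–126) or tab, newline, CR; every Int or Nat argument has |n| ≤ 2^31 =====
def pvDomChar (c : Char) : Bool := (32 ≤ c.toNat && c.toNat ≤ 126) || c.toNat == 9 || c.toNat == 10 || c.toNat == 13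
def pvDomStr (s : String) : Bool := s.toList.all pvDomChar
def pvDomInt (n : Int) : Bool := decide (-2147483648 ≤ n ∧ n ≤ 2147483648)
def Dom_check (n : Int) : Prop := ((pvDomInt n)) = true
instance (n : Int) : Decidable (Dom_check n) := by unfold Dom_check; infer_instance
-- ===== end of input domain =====

-- B replaces A's (r+1)×(n+1) boolean DP table (inner loop over every j in 1..n per divisor)
-- with an increasing list of currently reachable subset sums, extended by a two-pointer
-- dedup merge once per divisor (objective: faster — it traverses only reachable sums).

-- shared helper: the Python 'divisors' (identical source in Source A and Source B).
-- int(n**0.5) is ported as Nat.sqrt n.toNat: exact for 0 ≤ n ≤ 2^31 (double sqrt is correctly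
-- rounded there, so int(n**0.5) = isqrt(n)); Pre_check restricts to 0 ≤ n.
def pyDivisors (n : Int) : List Int :=
  let v : PySem.Set Int :=
    (PySem.List.pyRange 1 ((Nat.sqrt n.toNat : Int) + 1) 1).foldl
      (fun v i =>
        if PySem.Int.mod n i = 0 then
          PySem.Set.add (PySem.Set.add v i) (PySem.Int.floordiv n i)
        else v)
      PySem.Set.empty
  PySem.List.slice (PySem.List.sorted v (fun x => x) false) none (some (-1))

-- ===== PORT A =====
-- one DP step: row i computed column-by-column from row i-1 (subset[i][0] = True from the init
-- loop). The row is an Array, matching the O(1) indexing of a Python list; inside Pre_check every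
-- index used (j and j - d, the latter only when d ≤ j) lies in range 0..n, so Array.getD is
-- exactly Python's subset[i-1][...] there.
def stepA (n : Int) (prev : Array Bool) (d : Int) : Array Bool :=
  ((PySem.List.pyRange 0 (n + 1) 1).map (fun j =>
    if j = 0 then true
    else if j < d then prev.getD j.toNat false
    else (prev.getD j.toNat false || prev.getD (j - d).toNat false))).toArray

def check (n : Int) : Bool :=
  let v := pyDivisors n
  let row0 : Array Bool :=
    ((PySem.List.pyRange 0 (n + 1) 1).map (fun j => if j = 0 then true else false)).toArray
  let lastRow := v.foldl (stepA n) row0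
  lastRow.getD n.toNat false

-- ===== PORT B =====
-- Source B's merge: two-pointer merge of two increasing lists dropping duplicates, transcribed as
-- tail recursion on the two lists; 'out' accumulates the merged prefix (reversed; out.append(v) is
-- consing, the final reverse restores Python's append order), the base cases are the two extends
def pyMergeLoop (out : List Int) : List Int → List Int → List Int
  | [], b => out.reverse ++ b
  | a, [] => out.reverse ++ a
  | x :: xs, y :: ys =>
      if x < y then pyMergeLoop (x :: out) xs (y :: ys)
      else if y < x then pyMergeLoop (y :: out) (x :: xs) ys
      else pyMergeLoop (x :: out) xs ys
  termination_by a b => a.length + b.length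

def pyMerge (a b : List Int) : List Int := pyMergeLoop [] a b

-- one step: sums = merge(sums, [s + d for s in sums if s + d <= n])
def stepB (n : Int) (sums : List Int) (d : Int) : List Int :=
  pyMerge sums ((sums.filter (fun s => decide (s + d ≤ n))).map (fun s => s + d))

def check_alt (n : Int) : Bool :=
  let sums := (pyDivisors n).foldl (stepB n) [0]
  sums.contains n

-- ===== PRECONDITION & SPEC =====
-- Pre_ excludes negative inputs, on which both Pythons raise TypeError (int() of a complex square root).
def Pre_check (n : Int) : Prop := 0 ≤ n
instance (n : Int) : Decidable (Pre_check n) := by unfold Pre_check; infer_instance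
def pvWitness_check : Int := 12

def Spec_check (n : Int) (out : Bool) : Prop := out = check_alt n
instance (n : Int) (out : Bool) : Decidable (Spec_check n out) := by unfold Spec_check; infer_instance

-- ===== CLAIM (what is proved, stated in full; the proofs are below) =====
def Claim_equal_check : Prop := ∀ (n : Int), Dom_check n → Pre_check n → Spec_check n (check n)

-- ===== LEMMAS AND PROOFS =====

-- every element of pyDivisors n (0 ≤ n) is nonnegative
lemma foldl_divisors_nonneg (n : Int) (hn : 0 ≤ n) (l : List Int) (acc : PySem.Set Int)
    (hl : ∀ i ∈ l, 1 ≤ i) (hacc : ∀ x ∈ acc, 0 ≤ x) :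
    ∀ x ∈ l.foldl
      (fun v i =>
        if PySem.Int.mod n i = 0 then
          PySem.Set.add (PySem.Set.add v i) (PySem.Int.floordiv n i)
        else v) acc, 0 ≤ x := by
  induction l generalizing acc with
  | nil => simpa using hacc
  | cons i l ih =>
    intro x hx
    simp only [List.foldl_cons] at hx
    refine ih _ (fun j hj => hl j (by simp [hj])) ?_ x hx
    intro y hy
    by_cases hmod : PySem.Int.mod n i = 0
    · rw [if_pos hmod, PySem.Set.mem_add, PySem.Set.mem_add] at hy
      have hi : 1 ≤ i := hl i (by simp)
      rcases hy with (hy | hy) | hy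
      · exact hacc y hy
      · omega
      · subst hy
        rw [PySem.Int.floordiv_eq_ediv_of_pos (by omega)]
        exact Int.ediv_nonneg hn (by omega)
    · rw [if_neg hmod] at hy
      exact hacc y hy

lemma pyDivisors_nonneg (n : Int) (hn : 0 ≤ n) : ∀ d ∈ pyDivisors n, 0 ≤ d := by
  intro d hd
  simp only [pyDivisors] at hd
  have hd' := PySem.List.mem_of_mem_slice _ _ _ hd
  rw [PySem.List.mem_sorted] at hd'
  refine foldl_divisors_nonneg n hn _ _ ?_ ?_ d hd'
  · intro i hi
    rw [PySem.List.mem_pyRange_one] at hi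
    omega
  · intro x hx
    simp [PySem.Set.empty] at hx

lemma mem_pyMergeLoop (out a b : List Int) (x : Int) :
    x ∈ pyMergeLoop out a b ↔ x ∈ out ∨ x ∈ a ∨ x ∈ b := by
  fun_induction pyMergeLoop out a b with
  | case1 => simp
  | case2 a h =>
      cases a with
      | nil => simp
      | cons z zs => simp; tauto
  | case3 out u us v vs h ih => simp [ih]; tauto
  | case4 out u us v vs h h' ih => simp [ih]; tauto
  | case5 out u us v vs h h' ih =>
      have huv : u = v := by omega
      subst huv
      simp at ih
      simp [ih]; tauto

lemma mem_pyMerge (a b : List Int) (x : Int) : x ∈ pyMerge a b ↔ x ∈ a ∨ x ∈ b := by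
  rw [pyMerge, mem_pyMergeLoop]; simp

-- value of A's freshly computed row at a column j ∈ [0, n]
lemma getD_row (f : Int → Bool) (n j : Int) (hj0 : 0 ≤ j) (hjn : j < n + 1) :
    (((PySem.List.pyRange 0 (n + 1) 1).map f).toArray).getD j.toNat false = f j := by
  have h1 : (((PySem.List.pyRange 0 (n + 1) 1).map f).toArray).getD j.toNat false
      = ((PySem.List.pyRange 0 (n + 1) 1).map f).getD j.toNat false := by
    simp only [Array.getD, List.getD, List.size_toArray]
    split
    · rename_i h; simp [List.getElem?_eq_getElem h]
    · rename_i h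
      simp [List.getElem?_eq_none
        (by omega : ((PySem.List.pyRange 0 (n + 1) 1).map f).length ≤ j.toNat)]
  have h2 : ((PySem.List.pyRange 0 (n + 1) 1).map f).getD j.toNat false
      = PySem.List.pyGetD ((PySem.List.pyRange 0 (n + 1) 1).map f) ((j.toNat : Nat) : Int) false := by
    rw [PySem.List.pyGetD_natCast]
  rw [h1, h2, PySem.List.pyGetD_map_pyRange_of_nonneg _ (n + 1) _ false (by omega) (by omega)]
  congr 1
  omega

-- invariant relating A's DP row to B's reachable-sum list
def DPInv (n : Int) (prev : Array Bool) (sums : List Int) : Prop :=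
  (0 : Int) ∈ sums ∧
  (∀ s ∈ sums, 0 ≤ s ∧ s ≤ n) ∧
  (∀ j : Int, 0 ≤ j → j ≤ n → (prev.getD j.toNat false = true ↔ j ∈ sums))

lemma inv_step (n : Int) (prev : Array Bool) (sums : List Int) (d : Int)
    (hd : 0 ≤ d) (h : DPInv n prev sums) : DPInv n (stepA n prev d) (stepB n sums d) := by
  obtain ⟨h0, hb, hiff⟩ := h
  have hmemB : ∀ j : Int, j ∈ stepB n sums d ↔ j ∈ sums ∨ (j - d ∈ sums ∧ j ≤ n) := by
    intro j
    unfold stepB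
    rw [mem_pyMerge]
    constructor
    · rintro (hj | hj)
      · exact Or.inl hj
      · simp only [List.mem_map, List.mem_filter, decide_eq_true_eq] at hj
        obtain ⟨s, ⟨hs, hsn⟩, rfl⟩ := hj
        exact Or.inr ⟨by simpa using hs, hsn⟩
    · rintro (hj | ⟨hj, hjn⟩)
      · exact Or.inl hj
      · right
        simp only [List.mem_map, List.mem_filter, decide_eq_true_eq]
        exact ⟨j - d, ⟨hj, by omega⟩, by omega⟩
  refine ⟨by rw [hmemB]; exact Or.inl h0, ?_, ?_⟩
  · intro s hs
    rw [hmemB] at hs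
    rcases hs with hs | ⟨hs, hsn⟩
    · exact hb s hs
    · have := hb _ hs; omega
  · intro j hj0 hjn
    have hgetA : (stepA n prev d).getD j.toNat false =
        (if j = 0 then true
         else if j < d then prev.getD j.toNat false
         else (prev.getD j.toNat false || prev.getD (j - d).toNat false)) :=
      getD_row _ n j hj0 (by omega)
    rw [hgetA, hmemB]
    by_cases hj0' : j = 0
    · subst hj0'
      exact ⟨fun _ => Or.inl h0, fun _ => if_pos rfl⟩
    · rw [if_neg hj0']
      by_cases hjd : j < d
      · rw [if_pos hjd, hiff j hj0 hjn]
        constructor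
        · exact Or.inl
        · rintro (h | ⟨h, _⟩)
          · exact h
          · have := hb _ h; omega
      · rw [if_neg hjd]
        rw [not_lt] at hjd
        rw [Bool.or_eq_true, hiff j hj0 hjn, hiff (j - d) (by omega) (by omega)]
        constructor
        · rintro (h | h)
          · exact Or.inl h
          · exact Or.inr ⟨h, hjn⟩
        · rintro (h | ⟨h, _⟩)
          · exact Or.inl h
          · exact Or.inr h

lemma inv_fold (n : Int) (ds : List Int) (prev : Array Bool) (sums : List Int)
    (hds : ∀ d ∈ ds, 0 ≤ d) (h : DPInv n prev sums) :
    DPInv n (ds.foldl (stepA n) prev) (ds.foldl (stepB n) sums) := by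
  induction ds generalizing prev sums with
  | nil => simpa using h
  | cons d ds ih =>
    simp only [List.foldl_cons]
    exact ih _ _ (fun x hx => hds x (by simp [hx])) (inv_step n prev sums d (hds d (by simp)) h)

lemma inv_base (n : Int) (hn : 0 ≤ n) :
    DPInv n (((PySem.List.pyRange 0 (n + 1) 1).map (fun j => if j = 0 then true else false)).toArray)
      [0] := by
  refine ⟨by simp, by simp [hn], ?_⟩
  intro j hj0 hjn
  rw [getD_row _ n j hj0 (by omega)]
  by_cases hj : j = 0 <;> simp [hj]

-- ===== VERDICT (by name: the statement is the Claim_ definition above) =====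
theorem check_spec : Claim_equal_check := by
  intro n _ hn
  unfold Spec_check check check_alt
  obtain ⟨-, -, hiff⟩ :=
    inv_fold n (pyDivisors n) _ _ (pyDivisors_nonneg n hn) (inv_base n hn)
  have h := hiff n hn le_rfl
  by_cases hmem : (n:Int) ∈ (pyDivisors n).foldl (stepB n) [0]
  · simp only [hmem, iff_true] at h
    simp only [List.contains_eq_mem, hmem, decide_true]
    simpa using h
  · simp only [hmem, iff_false, Bool.not_eq_true] at h
    simp only [List.contains_eq_mem, hmem, decide_false]
    simpa using h
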